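-- pv_equiv track=rewrite | github.com/Connor-OS/AoC | 2024/day_9.py | process
-- ===== SOURCE A (Python) =====
-- def process(files, gaps, file_que):
--     # two pointers from each end
--     answer = 0
--     i, j = 0, len(file_que) - 1
--
--     count = 0
--     while True:
--         file = files.pop()
--         for f in range(file):
--             answer += count * file_que[i]
--             i += 1
--             count += 1
--             if i > j: return answer
--         gap = gaps.pop()
--         for g in range(gap):
--             answer += count * file_que[j]
--             j -= 1
--             count += 1
--             if i > j: return answer
-- ===== SOURCE B (Python) =====
-- def process(files, gaps, file_que):
--     # Two-phase rewrite: first build the order in which A visits file_que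
--     # (alternating front slices and reversed back slices), then return one
--     # position-weighted sum over that order.  Return value only: unlike A,
--     # this does not pop elements off files/gaps.
--     n = len(file_que)
--     i, j = 0, n - 1
--     seq = []
--     for k in range(len(files)):
--         take = min(max(files[-1 - k], 0), j + 1 - i)
--         seq += file_que[i:i + take]
--         i += take
--         if i > j:
--             break
--         if k < len(gaps):
--             take = min(max(gaps[-1 - k], 0), j + 1 - i)
--             seq += file_que[j - take + 1:j + 1][::-1]
--             j -= take
--             if i > j:
--                 break
--     return sum(c * v for c, v in enumerate(seq))
-- ===== Notes on version B (the rewrite author's own statement) =====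
-- stated objective: alternative
-- what changed: B replaces A's mutating two-pointer while-loop with per-block early returns by a two-phase computation: it first builds the visiting order of file_que as alternating front slices and reversed back slices (clipped with min/max in a bounded for-loop instead of pops and in-loop returns), then returns a single enumerate-based weighted sum; Pre_ excludes only inputs where A raises (pop from an exhausted list or an out-of-range file_que index).
import Mathlib
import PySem

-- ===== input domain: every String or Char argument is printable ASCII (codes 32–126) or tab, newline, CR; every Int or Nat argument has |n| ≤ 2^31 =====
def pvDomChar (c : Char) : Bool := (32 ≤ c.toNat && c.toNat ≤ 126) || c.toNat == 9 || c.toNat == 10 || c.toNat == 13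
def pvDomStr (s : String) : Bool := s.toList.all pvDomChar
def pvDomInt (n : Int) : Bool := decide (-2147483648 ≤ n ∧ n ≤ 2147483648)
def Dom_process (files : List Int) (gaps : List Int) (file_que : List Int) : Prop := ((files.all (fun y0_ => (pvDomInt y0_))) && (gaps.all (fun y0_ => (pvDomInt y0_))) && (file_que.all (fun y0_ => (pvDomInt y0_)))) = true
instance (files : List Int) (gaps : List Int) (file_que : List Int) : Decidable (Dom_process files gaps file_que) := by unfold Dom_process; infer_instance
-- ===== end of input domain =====

-- B builds the visiting order first and takes one weighted sum (alternative decomposition,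
-- same cost); return value only: A pops all consumed entries off files/gaps, B does not mutate.

-- ===== PORT A =====
-- inner 'for f in range(file)' loop; Sum.inl = early 'return answer'
def fileLoopA (fq : List Int) (j : Int) : Nat → Int → Int → Int → Sum Int (Int × Int × Int)
  | 0, i, count, answer => Sum.inr (i, count, answer)
  | Nat.succ m, i, count, answer =>
    match PySem.List.pyGet? fq i with
    | none => Sum.inl 0  -- file_que[i] IndexError in Python; excluded by Pre_process
    | some v =>
      let answer1 := answer + count * v
      let i1 := i + 1
      let count1 := count + 1
      if i1 > j then Sum.inl answer1 else fileLoopA fq j m i1 count1 answer1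

-- inner 'for g in range(gap)' loop; Sum.inl = early 'return answer'
def gapLoopA (fq : List Int) (i : Int) : Nat → Int → Int → Int → Sum Int (Int × Int × Int)
  | 0, j, count, answer => Sum.inr (j, count, answer)
  | Nat.succ m, j, count, answer =>
    match PySem.List.pyGet? fq j with
    | none => Sum.inl 0  -- file_que[j] IndexError in Python; excluded by Pre_process
    | some v =>
      let answer1 := answer + count * v
      let j1 := j - 1
      let count1 := count + 1
      if i > j1 then Sum.inl answer1 else gapLoopA fq i m j1 count1 answer1

-- the 'while True' loop; each round pops the last element of files and of gaps
def outerA (fq : List Int) (files gaps : List Int) (i j count answer : Int) : Int :=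
  match _hp : PySem.List.pop? files with
  | none => 0  -- files.pop() IndexError in Python; excluded by Pre_process
  | some (file, files1) =>
    match fileLoopA fq j file.toNat i count answer with
    | Sum.inl ans => ans
    | Sum.inr (i1, count1, answer1) =>
      match PySem.List.pop? gaps with
      | none => 0  -- gaps.pop() IndexError in Python; excluded by Pre_process
      | some (gap, gaps1) =>
        match gapLoopA fq i1 gap.toNat j count1 answer1 with
        | Sum.inl ans => ans
        | Sum.inr (j2, count2, answer2) => outerA fq files1 gaps1 i1 j2 count2 answer2
termination_by files.length
decreasing_by
  have h := PySem.List.length_of_pop?_eq_some files _hp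
  simp at h ⊢; omega

def process (files : List Int) (gaps : List Int) (file_que : List Int) : Int :=
  outerA file_que files gaps 0 ((file_que.length : Int) - 1) 0 0

-- ===== PORT B =====
-- sum(c * v for c, v in enumerate(seq))
def pyWSum (seq : List Int) : Int :=
  (PySem.List.enumerate seq).foldl (fun a p => a + p.1 * p.2) 0

-- the 'for k in range(len(files))' loop of Source B, building seq; returning seq = break/fall-through
def bLoop (files gaps fq : List Int) : List Int → Int → Int → List Int → List Int
  | [], _, _, seq => seq
  | k :: ks, i, j, seq =>
    -- files[-1 - k] is always in range for k from range(len(files)); pyGetD is exact here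
    let take1 := min (max (PySem.List.pyGetD files (-1 - k) 0) 0) (j + 1 - i)
    let seq1 := seq ++ PySem.List.slice fq (some i) (some (i + take1))
    let i1 := i + take1
    if i1 > j then seq1
    else if k < (gaps.length : Int) then
      let take2 := min (max (PySem.List.pyGetD gaps (-1 - k) 0) 0) (j + 1 - i1)
      -- file_que[j-take+1:j+1][::-1] : slice then reverse
      let seq2 := seq1 ++ (PySem.List.slice fq (some (j - take2 + 1)) (some (j + 1))).reverse
      let j2 := j - take2
      if i1 > j2 then seq2 else bLoop files gaps fq ks i1 j2 seq2
    else bLoop files gaps fq ks i1 j seq1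

def process_alt (files : List Int) (gaps : List Int) (file_que : List Int) : Int :=
  pyWSum (bLoop files gaps file_que
    (PySem.List.pyRange 0 (files.length : Int)) 0 ((file_que.length : Int) - 1) [])

-- ===== PRECONDITION & SPEC =====
-- clipped number of blocks the interleaved reversed files/gaps runs supply before a pop
-- from an exhausted list would be needed
def pvCap : List Int → List Int → Int
  | [], _ => 0
  | f :: _, [] => (f.toNat : Int)
  | f :: F, g :: G => (f.toNat : Int) + (g.toNat : Int) + pvCap F G

-- A raises (pop from empty list or IndexError on file_que) unless file_que is nonempty and the
-- runs supply at least len(file_que) blocks before either list is exhausted; Pre_ is exactly that.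
def Pre_process (files : List Int) (gaps : List Int) (file_que : List Int) : Prop :=
  1 ≤ file_que.length ∧ (file_que.length : Int) ≤ pvCap files.reverse gaps.reverse
instance (files : List Int) (gaps : List Int) (file_que : List Int) : Decidable (Pre_process files gaps file_que) := by unfold Pre_process; infer_instance

def pvWitness_process : List Int × List Int × List Int := ([2], [1], [3, 4, 5])

def Spec_process (files : List Int) (gaps : List Int) (file_que : List Int) (out : Int) : Prop := out = process_alt files gaps file_que
instance (files : List Int) (gaps : List Int) (file_que : List Int) (out : Int) : Decidable (Spec_process files gaps file_que out) := by unfold Spec_process; infer_instance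

-- ===== CLAIM (what is proved, stated in full; the proofs are below) =====
def Claim_equal_process : Prop := ∀ (files : List Int) (gaps : List Int) (file_que : List Int), Dom_process files gaps file_que → Pre_process files gaps file_que → Spec_process files gaps file_que (process files gaps file_que)

-- ===== LEMMAS AND PROOFS =====

-- weighted accumulation: foldl of enumerate starting at index s with accumulator acc
def wadd (s : Int) (l : List Int) (acc : Int) : Int :=
  (PySem.List.enumerate l s).foldl (fun a p => a + p.1 * p.2) acc

theorem pyWSum_eq_wadd (seq : List Int) : pyWSum seq = wadd 0 seq 0 := rfl

theorem wadd_nil (s acc : Int) : wadd s [] acc = acc := rfl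

theorem wadd_cons (s x acc : Int) (l : List Int) :
    wadd s (x :: l) acc = wadd (s + 1) l (acc + s * x) := by
  simp [wadd, PySem.List.enumerate_cons]

theorem wadd_append (s acc : Int) (l1 l2 : List Int) :
    wadd s (l1 ++ l2) acc = wadd (s + l1.length) l2 (wadd s l1 acc) := by
  simp [wadd, PySem.List.enumerate_append, List.foldl_append]

theorem length_slice' (xs : List Int) {a b : Int} (h0 : 0 ≤ a) (hab : a ≤ b)
    (hb : b ≤ (xs.length : Int)) :
    ((PySem.List.slice xs (some a) (some b)).length : Int) = b - a := by
  rw [PySem.List.slice_of_nonneg xs h0 (by omega) (by omega) hb]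
  simp only [List.length_take, List.length_drop]
  omega

theorem pyGet?_in_range (xs : List Int) {i : Int} (h0 : 0 ≤ i) (h1 : i < (xs.length : Int)) :
    PySem.List.pyGet? xs i = some (PySem.List.pyGetD xs i 0) := by
  rw [PySem.List.pyGet?_of_nonneg xs h0, PySem.List.pyGetD_eq_getElem xs 0 h0 h1,
    List.getElem?_eq_getElem (by omega)]

theorem slice_cons' (xs : List Int) {a b : Int} (h0 : 0 ≤ a) (hab : a < b)
    (hb : b ≤ (xs.length : Int)) :
    PySem.List.slice xs (some a) (some b)
      = PySem.List.pyGetD xs a 0 :: PySem.List.slice xs (some (a + 1)) (some b) := by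
  have ha : a.toNat < xs.length := by omega
  rw [PySem.List.slice_of_nonneg xs h0 (by omega) (by omega) hb,
    PySem.List.slice_of_nonneg xs (by omega : (0:Int) ≤ a + 1) (by omega) (by omega) hb,
    PySem.List.pyGetD_eq_getElem xs 0 h0 (by omega), List.drop_eq_getElem_cons ha]
  have e1 : (a + 1).toNat = a.toNat + 1 := by omega
  have e2 : b.toNat - a.toNat = (b.toNat - (a + 1).toNat) + 1 := by omega
  rw [e2, e1, List.take_succ_cons]

theorem slice_snoc' (xs : List Int) {a b : Int} (h0 : 0 ≤ a) (hab : a ≤ b)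
    (hb : b < (xs.length : Int)) :
    PySem.List.slice xs (some a) (some (b + 1))
      = PySem.List.slice xs (some a) (some b) ++ [PySem.List.pyGetD xs b 0] := by
  rw [PySem.List.slice_of_nonneg xs h0 (by omega) (by omega) (by omega),
    PySem.List.slice_of_nonneg xs h0 (by omega) (by omega) (by omega),
    PySem.List.pyGetD_eq_getElem xs 0 (by omega) hb]
  have e1 : (b + 1).toNat - a.toNat = (b.toNat - a.toNat) + 1 := by omega
  rw [e1, List.take_add_one, List.getElem?_drop]
  have e2 : a.toNat + (b.toNat - a.toNat) = b.toNat := by omega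
  rw [e2, List.getElem?_eq_getElem (by omega)]
  simp

theorem fileLoopA_spec (fq : List Int) (j : Int) (m : Nat) :
    ∀ (i count answer : Int), 0 ≤ i → i ≤ j → j < (fq.length : Int) →
    fileLoopA fq j m i count answer =
      if (m : Int) < j + 1 - i
      then Sum.inr (i + (m : Int), count + (m : Int),
             wadd count (PySem.List.slice fq (some i) (some (i + (m : Int)))) answer)
      else Sum.inl (wadd count (PySem.List.slice fq (some i) (some (j + 1))) answer) := by
  induction m with
  | zero =>
    intro i count answer h0 hij hj
    have hsl : PySem.List.slice fq (some i) (some (i + ((0:Nat) : Int))) = [] := by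
      apply List.eq_nil_of_length_eq_zero
      have := length_slice' fq (a := i) (b := i + ((0:Nat) : Int)) h0 (by omega) (by omega)
      omega
    rw [if_pos (by omega : ((0:Nat) : Int) < j + 1 - i), hsl]
    simp [fileLoopA, wadd_nil]
  | succ m ih =>
    intro i count answer h0 hij hj
    have hacc := pyGet?_in_range fq h0 (by omega)
    show (match PySem.List.pyGet? fq i with
      | none => Sum.inl 0
      | some v =>
        if i + 1 > j then Sum.inl (answer + count * v)
        else fileLoopA fq j m (i + 1) (count + 1) (answer + count * v)) = _
    rw [hacc]
    show (if i + 1 > j then Sum.inl (answer + count * PySem.List.pyGetD fq i 0)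
      else fileLoopA fq j m (i + 1) (count + 1) (answer + count * PySem.List.pyGetD fq i 0)) = _
    by_cases hc : i + 1 > j
    · rw [if_pos hc, if_neg (by push_cast; omega)]
      have hij' : i = j := by omega
      have hsl0 : PySem.List.slice fq (some (i + 1)) (some (j + 1)) = [] := by
        apply List.eq_nil_of_length_eq_zero
        have := length_slice' fq (a := i + 1) (b := j + 1) (by omega) (by omega) (by omega)
        omega
      rw [slice_cons' fq h0 (by omega) (by omega), hsl0, wadd_cons, wadd_nil]
    · rw [if_neg hc, ih (i + 1) (count + 1) _ (by omega) (by omega) hj]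
      by_cases hm : (m : Int) < j + 1 - (i + 1)
      · rw [if_pos hm, if_pos (by push_cast; omega)]
        push_cast
        rw [slice_cons' fq h0 (by omega) (by omega), wadd_cons]
        have e1 : i + 1 + (m : Int) = i + ((m : Int) + 1) := by ring
        have e2 : count + 1 + (m : Int) = count + ((m : Int) + 1) := by ring
        rw [e1, e2]
      · rw [if_neg hm, if_neg (by push_cast; omega)]
        rw [slice_cons' fq h0 (by omega) (by omega), wadd_cons]

theorem gapLoopA_spec (fq : List Int) (i : Int) (m : Nat) :
    ∀ (j count answer : Int), 0 ≤ i → i ≤ j → j < (fq.length : Int) →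
    gapLoopA fq i m j count answer =
      if (m : Int) < j + 1 - i
      then Sum.inr (j - (m : Int), count + (m : Int),
             wadd count ((PySem.List.slice fq (some (j + 1 - (m : Int))) (some (j + 1))).reverse) answer)
      else Sum.inl (wadd count ((PySem.List.slice fq (some i) (some (j + 1))).reverse) answer) := by
  induction m with
  | zero =>
    intro j count answer h0 hij hj
    have hsl : PySem.List.slice fq (some (j + 1 - ((0:Nat) : Int))) (some (j + 1)) = [] := by
      apply List.eq_nil_of_length_eq_zero
      have := length_slice' fq (a := j + 1 - ((0:Nat) : Int)) (b := j + 1) (by omega) (by omega)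
        (by omega)
      omega
    rw [if_pos (by omega : ((0:Nat) : Int) < j + 1 - i), hsl]
    simp [gapLoopA, wadd_nil]
  | succ m ih =>
    intro j count answer h0 hij hj
    have hacc := pyGet?_in_range fq (i := j) (by omega) (by omega)
    show (match PySem.List.pyGet? fq j with
      | none => Sum.inl 0
      | some v =>
        if i > j - 1 then Sum.inl (answer + count * v)
        else gapLoopA fq i m (j - 1) (count + 1) (answer + count * v)) = _
    rw [hacc]
    show (if i > j - 1 then Sum.inl (answer + count * PySem.List.pyGetD fq j 0)
      else gapLoopA fq i m (j - 1) (count + 1) (answer + count * PySem.List.pyGetD fq j 0)) = _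
    by_cases hc : i > j - 1
    · rw [if_pos hc, if_neg (by push_cast; omega)]
      have hij' : i = j := by omega
      have hsl0 : PySem.List.slice fq (some i) (some j) = [] := by
        apply List.eq_nil_of_length_eq_zero
        have := length_slice' fq (a := i) (b := j) h0 (by omega) (by omega)
        omega
      rw [slice_snoc' fq h0 hij hj, hsl0, List.nil_append, List.reverse_singleton,
        wadd_cons, wadd_nil]
    · rw [if_neg hc, ih (j - 1) (count + 1) _ h0 (by omega) (by omega)]
      by_cases hm : (m : Int) < (j - 1) + 1 - i
      · rw [if_pos hm, if_pos (by push_cast; omega)]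
        push_cast
        have e0 : j + 1 - ((m : Int) + 1) = j - (m : Int) := by ring
        rw [e0]
        have e1 : j - 1 + 1 - (m : Int) = j - (m : Int) := by ring
        have e2 : j - 1 + 1 = j := by ring
        rw [e1, e2, slice_snoc' fq (a := j - (m : Int)) (b := j) (by omega) (by omega) hj,
          List.reverse_append, List.reverse_singleton, List.singleton_append, wadd_cons]
        have e3 : j - 1 - (m : Int) = j - ((m : Int) + 1) := by ring
        have e4 : count + 1 + (m : Int) = count + ((m : Int) + 1) := by ring
        rw [e3, e4]
      · rw [if_neg hm, if_neg (by push_cast; omega)]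
        rw [slice_snoc' fq h0 (by omega) hj, List.reverse_append, List.reverse_singleton,
          List.singleton_append, wadd_cons]
        have e1 : j - 1 + 1 = j := by ring
        rw [e1]

-- bLoop with reversed lists made structural
def bLoopRev (fq : List Int) : List Int → List Int → Int → Int → List Int → List Int
  | [], _, _, _, seq => seq
  | f :: F, G, i, j, seq =>
    let take1 := min (max f 0) (j + 1 - i)
    let seq1 := seq ++ PySem.List.slice fq (some i) (some (i + take1))
    let i1 := i + take1
    if i1 > j then seq1
    else match G with
      | [] => bLoopRev fq F [] i1 j seq1
      | g :: G' =>
        let take2 := min (max g 0) (j + 1 - i1)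
        let seq2 := seq1 ++ (PySem.List.slice fq (some (j - take2 + 1)) (some (j + 1))).reverse
        let j2 := j - take2
        if i1 > j2 then seq2 else bLoopRev fq F G' i1 j2 seq2

theorem pyGetD_neg_rev (xs : List Int) (k : Nat) (hk : k < xs.length) :
    PySem.List.pyGetD xs (-1 - (k : Int)) 0 = xs.reverse.getD k 0 := by
  have h : (-1 - (k : Int)) = -(((k + 1 : Nat)) : Int) := by push_cast; ring
  rw [h, PySem.List.pyGetD_neg_natCast xs (k + 1) 0 (by omega) (by omega),
    List.getD_eq_getElem _ _ (by simpa using hk), List.getElem_reverse]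
  simp only [show xs.length - (k + 1) = xs.length - 1 - k from by omega]

theorem bLoop_eq_rev (files gaps fq : List Int) :
    ∀ (d k : Nat), files.length = k + d → ∀ (i j : Int) (seq : List Int),
    bLoop files gaps fq (PySem.List.pyRange (k : Int) (files.length : Int)) i j seq
      = bLoopRev fq (files.reverse.drop k) (gaps.reverse.drop k) i j seq := by
  intro d
  induction d with
  | zero =>
    intro k hk i j seq
    rw [PySem.List.pyRange_one_eq_nil (by omega),
      List.drop_eq_nil_of_le (by simp; omega)]
    rfl
  | succ d ih =>
    intro k hk i j seq
    have hkf : k < files.length := by omega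
    have hkr : k < files.reverse.length := by simpa using hkf
    have hrec : ∀ (i' j' : Int) (seq' : List Int),
        bLoop files gaps fq (PySem.List.pyRange ((k : Int) + 1) (files.length : Int)) i' j' seq'
          = bLoopRev fq (files.reverse.drop (k + 1)) (gaps.reverse.drop (k + 1)) i' j' seq' := by
      intro i' j' seq'
      have := ih (k + 1) (by omega) i' j' seq'
      push_cast at this
      exact this
    rw [PySem.List.pyRange_one_cons (by omega : (k : Int) < (files.length : Int)),
      List.drop_eq_getElem_cons hkr]
    simp only [bLoop, bLoopRev]
    rw [pyGetD_neg_rev files k hkf, List.getD_eq_getElem _ _ hkr]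
    by_cases hb1 : i + min (max files.reverse[k] 0) (j + 1 - i) > j
    · rw [if_pos hb1, if_pos hb1]
    · rw [if_neg hb1, if_neg hb1]
      by_cases hg : k < gaps.length
      · have hgr : k < gaps.reverse.length := by simpa using hg
        rw [List.drop_eq_getElem_cons hgr,
          if_pos (show (k : Int) < (gaps.length : Int) by omega),
          pyGetD_neg_rev gaps k hg, List.getD_eq_getElem _ _ hgr]
        dsimp only
        by_cases hb2 : i + min (max files.reverse[k] 0) (j + 1 - i) >
            j - min (max gaps.reverse[k] 0)
              (j + 1 - (i + min (max files.reverse[k] 0) (j + 1 - i)))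
        · rw [if_pos hb2, if_pos hb2]
        · rw [if_neg hb2, if_neg hb2, hrec]
      · have hg1 : gaps.reverse.drop k = [] := List.drop_eq_nil_of_le (by simp; omega)
        have hg2 : gaps.reverse.drop (k + 1) = [] := List.drop_eq_nil_of_le (by simp; omega)
        rw [hg1, if_neg (show ¬ ((k : Int) < (gaps.length : Int)) by omega)]
        dsimp only
        rw [hrec, hg2]

theorem outer_spec (fq : List Int) :
    ∀ (F G : List Int) (i j count answer : Int) (seq : List Int),
    0 ≤ i → i ≤ j → j < (fq.length : Int) →
    count = (seq.length : Int) → answer = wadd 0 seq 0 →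
    j + 1 - i ≤ pvCap F G →
    outerA fq F.reverse G.reverse i j count answer = pyWSum (bLoopRev fq F G i j seq) := by
  intro F
  induction F with
  | nil =>
    intro G i j count answer seq h0 hij hj hcount hans hcap
    exfalso
    simp only [pvCap] at hcap
    omega
  | cons f F ih =>
    intro G i j count answer seq h0 hij hj hcount hans hcap
    have hrev : (f :: F).reverse = F.reverse ++ [f] := by simp
    rw [hrev, outerA]
    split
    · next heq => rw [PySem.List.pop?_last] at heq; cases heq
    · next file files1 heq =>
      rw [PySem.List.pop?_last] at heq
      simp only [Option.some.injEq, Prod.mk.injEq] at heq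
      obtain ⟨rfl, rfl⟩ := heq
      rw [fileLoopA_spec fq j f.toNat i count answer h0 hij hj,
        (by omega : ((f.toNat : Nat) : Int) = max f 0)]
      simp only [bLoopRev]
      by_cases hcross1 : max f 0 < j + 1 - i
      · rw [if_pos hcross1, (by omega : min (max f 0) (j + 1 - i) = max f 0),
          if_neg (show ¬ (i + max f 0 > j) by omega)]
        dsimp only
        have hlen1 : (((PySem.List.slice fq (some i) (some (i + max f 0))).length : Nat) : Int)
            = max f 0 := by
          rw [length_slice' fq (by omega) (by omega) (by omega)]; ring
        cases G with
        | nil =>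
          exfalso
          simp only [pvCap] at hcap
          omega
        | cons g G' =>
          rw [(by simp : (g :: G').reverse = G'.reverse ++ [g]), PySem.List.pop?_last]
          dsimp only
          rw [gapLoopA_spec fq (i + max f 0) g.toNat j (count + max f 0) _ (by omega) (by omega) hj,
            (by omega : ((g.toNat : Nat) : Int) = max g 0)]
          simp only [pvCap] at hcap
          by_cases hcross2 : max g 0 < j + 1 - (i + max f 0)
          · rw [if_pos hcross2, (by omega : min (max g 0) (j + 1 - (i + max f 0)) = max g 0),
              if_neg (show ¬ (i + max f 0 > j - max g 0) by omega)]
            dsimp only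
            have hlen2 : (((PySem.List.slice fq (some (j - max g 0 + 1)) (some (j + 1))).length
                : Nat) : Int) = max g 0 := by
              rw [length_slice' fq (by omega) (by omega) (by omega)]; ring
            have e1 : j + 1 - max g 0 = j - max g 0 + 1 := by ring
            rw [e1]
            exact ih G' (i + max f 0) (j - max g 0) (count + max f 0 + max g 0) _ _
              (by omega) (by omega) (by omega)
              (by simp only [List.length_append, List.length_reverse]; push_cast
                  omega)
              (by rw [wadd_append, wadd_append]
                  simp only [List.length_append, zero_add]
                  push_cast
                  rw [hlen1, ← hcount, ← hans])
              (by omega)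
          · rw [if_neg hcross2,
              (by omega : min (max g 0) (j + 1 - (i + max f 0)) = j + 1 - (i + max f 0)),
              if_pos (show i + max f 0 > j - (j + 1 - (i + max f 0)) by omega)]
            dsimp only
            have e1 : j - (j + 1 - (i + max f 0)) + 1 = i + max f 0 := by ring
            rw [e1, pyWSum_eq_wadd, wadd_append, wadd_append]
            simp only [List.length_append, zero_add]
            push_cast
            rw [hlen1, ← hcount, ← hans]
      · rw [if_neg hcross1,
          (by omega : min (max f 0) (j + 1 - i) = j + 1 - i),
          (by ring : i + (j + 1 - i) = j + 1),
          if_pos (show j + 1 > j by omega)]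
        dsimp only
        rw [pyWSum_eq_wadd, wadd_append]
        simp only [zero_add]
        rw [← hcount, ← hans]

-- ===== VERDICT (by name: the statement is the Claim_ definition above) =====
theorem process_spec : Claim_equal_process := by
  intro files gaps fq _ hPre
  obtain ⟨h1, h2⟩ := hPre
  unfold Spec_process process process_alt
  have hb := bLoop_eq_rev files gaps fq files.length 0 (by omega) 0 ((fq.length : Int) - 1) []
  norm_num at hb
  rw [hb]
  have ho := outer_spec fq files.reverse gaps.reverse 0 ((fq.length : Int) - 1) 0 0 []
    (by omega) (by omega) (by omega) (by simp) (by rw [wadd_nil]) (by omega)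
  rw [List.reverse_reverse, List.reverse_reverse] at ho
  exact ho
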